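-- pv_equiv track=rewrite | github.com/uday-gandhi04/LeetCode | 3790-fruits-into-baskets-ii/fruits-into-baskets-ii.py | numOfUnplacedFruits
-- ===== SOURCE A (Python) =====
-- def numOfUnplacedFruits(fruits, baskets):
--     """
--     :type fruits: List[int]
--     :type baskets: List[int]
--     :rtype: int
--     """
--     out=0
--     for fruit in fruits:
--         flag=False
--         for i in range(len(baskets)):
--             if baskets[i]>=fruit:
--                 baskets[i]=0
--                 flag=True
--                 break
--         if not flag:
--             out+=1
--     return out
-- ===== SOURCE B (Python) =====
-- def numOfUnplacedFruits(fruits, baskets):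
--     """Segment tree of basket capacities; leftmost-fit query per fruit (O((n+m) log n)).
--     Unlike A, does not mutate `baskets`; the return value is identical."""
--     n = len(baskets)
--     if n == 0:
--         return len(fruits)
--     tree = [0] * (4 * n)
--
--     def build(node, lo, hi):
--         if lo == hi:
--             tree[node] = baskets[lo]
--             return
--         mid = (lo + hi) // 2
--         build(2 * node, lo, mid)
--         build(2 * node + 1, mid + 1, hi)
--         tree[node] = max(tree[2 * node], tree[2 * node + 1])
--
--     def place(node, lo, hi, f):
--         # place f in the leftmost basket of [lo,hi] with capacity >= f; True iff placed
--         if tree[node] < f: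
--             return False
--         if lo == hi:
--             tree[node] = 0
--             return True
--         mid = (lo + hi) // 2
--         if not place(2 * node, lo, mid, f):
--             place(2 * node + 1, mid + 1, hi, f)
--         tree[node] = max(tree[2 * node], tree[2 * node + 1])
--         return True
--
--     build(1, 0, n - 1)
--     out = 0
--     for f in fruits:
--         if not place(1, 0, n - 1, f):
--             out += 1
--     return out
-- ===== Notes on version B (the rewrite author's own statement) =====
-- stated objective: faster
-- what changed: Replaces A's linear scan over all baskets per fruit with a max segment tree over basket capacities and a leftmost-fit descent per fruit (zeroing the chosen leaf), so the inner O(n) scan becomes O(log n); B also leaves the baskets list unmutated.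
import Mathlib
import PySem

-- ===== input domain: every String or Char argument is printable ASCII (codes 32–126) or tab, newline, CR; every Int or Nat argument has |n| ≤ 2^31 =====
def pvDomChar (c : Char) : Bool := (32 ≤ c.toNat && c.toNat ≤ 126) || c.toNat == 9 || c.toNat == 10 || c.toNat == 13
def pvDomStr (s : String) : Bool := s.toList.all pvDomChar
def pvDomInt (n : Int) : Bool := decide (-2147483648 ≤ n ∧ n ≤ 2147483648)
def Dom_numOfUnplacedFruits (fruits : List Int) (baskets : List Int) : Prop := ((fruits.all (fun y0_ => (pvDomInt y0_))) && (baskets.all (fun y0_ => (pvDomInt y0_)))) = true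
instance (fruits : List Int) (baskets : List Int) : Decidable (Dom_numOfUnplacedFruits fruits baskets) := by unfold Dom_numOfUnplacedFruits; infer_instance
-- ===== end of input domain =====

-- B replaces A's O(n) linear scan per fruit by a max segment tree with a leftmost-fit
-- descent (zeroing the chosen leaf): asymptotically faster; equivalence is about the
-- RETURN value only (A mutates `baskets` in place, B does not).

-- ===== PORT A =====
-- A's inner `for i in range(len(baskets))` loop: find the first basket ≥ fruit, set it to 0.
def placeLoop (fruit : Int) : List Int → Bool × List Int
  | [] => (false, [])
  | b :: bs =>
    if b ≥ fruit then (true, 0 :: bs)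
    else
      let r := placeLoop fruit bs
      (r.1, b :: r.2)

def numOfUnplacedFruits (fruits : List Int) (baskets : List Int) : Int :=
  (fruits.foldl (fun st fruit =>
      let r := placeLoop fruit st.2
      (if r.1 then st.1 else st.1 + 1, r.2)) ((0 : Int), baskets)).1

-- ===== PORT B =====
-- pointer-form of Source B's array segment tree: each node stores the max of its leaves
inductive SegTree where
  | leaf : Int → SegTree
  | node : Int → SegTree → SegTree → SegTree
deriving DecidableEq, Repr

def SegTree.top : SegTree → Int
  | .leaf v => v
  | .node m _ _ => m

-- Source B's build(node, lo, hi): split at mid = (lo+hi)//2, i.e. left half of ⌈n/2⌉ elements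
def buildT (xs : List Int) : SegTree :=
  match xs with
  | [] => .leaf 0          -- unreachable: Source B returns early for empty baskets
  | [x] => .leaf x
  | a :: b :: rest =>
    let ys := a :: b :: rest
    let k := (ys.length + 1) / 2
    let l := buildT (ys.take k)
    let r := buildT (ys.drop k)
    .node (max l.top r.top) l r
termination_by xs.length
decreasing_by
  · simp [List.length_take]; omega
  · simp; omega

-- Source B's place(node, lo, hi, f): none = not placed; on success the updated tree
def placeT (f : Int) : SegTree → Option SegTree
  | .leaf v => if v < f then none else some (.leaf 0)
  | .node m l r =>
    if m < f then none
    else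
      match placeT f l with
      | some l' => some (.node (max l'.top r.top) l' r)
      | none =>
        -- python: `if not place(left): place(right)`, result of the right call ignored
        let r' := (placeT f r).getD r
        some (.node (max l.top r'.top) l r')

def numOfUnplacedFruits_alt (fruits : List Int) (baskets : List Int) : Int :=
  match baskets with
  | [] => (fruits.length : Int)
  | _ :: _ =>
    (fruits.foldl (fun st f =>
        match placeT f st.2 with
        | some t' => (st.1, t')
        | none => (st.1 + 1, st.2)) ((0 : Int), buildT baskets)).1

-- ===== PRECONDITION & SPEC =====
def Spec_numOfUnplacedFruits (fruits : List Int) (baskets : List Int) (out : Int) : Prop := out = numOfUnplacedFruits_alt fruits baskets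
instance (fruits : List Int) (baskets : List Int) (out : Int) : Decidable (Spec_numOfUnplacedFruits fruits baskets out) := by unfold Spec_numOfUnplacedFruits; infer_instance

-- ===== CLAIM (what is proved, stated in full; the proofs are below) =====
def Claim_equal_numOfUnplacedFruits : Prop := ∀ (fruits : List Int) (baskets : List Int), Dom_numOfUnplacedFruits fruits baskets → Spec_numOfUnplacedFruits fruits baskets (numOfUnplacedFruits fruits baskets)

-- ===== LEMMAS AND PROOFS =====

def SegTree.leaves : SegTree → List Int
  | .leaf v => [v]
  | .node _ l r => l.leaves ++ r.leaves

def SegTree.maxOf : SegTree → Int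
  | .leaf v => v
  | .node _ l r => max l.maxOf r.maxOf

def WF : SegTree → Prop
  | .leaf _ => True
  | .node m l r => m = max l.maxOf r.maxOf ∧ WF l ∧ WF r

theorem top_eq_maxOf (t : SegTree) (h : WF t) : t.top = t.maxOf := by
  cases t with
  | leaf v => rfl
  | node m l r => exact h.1

theorem leaves_buildT (xs : List Int) (h : xs ≠ []) : (buildT xs).leaves = xs := by
  induction xs using buildT.induct with
  | case1 => simp at h
  | case2 x => simp [buildT, SegTree.leaves]
  | case3 a b rest ys k ihl ihr =>
    rw [buildT]
    simp only [SegTree.leaves]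
    rw [ihl (by simp [ys, k]), ihr (by simp [ys, k]; omega)]
    exact List.take_append_drop k ys

theorem wf_buildT (xs : List Int) : WF (buildT xs) := by
  induction xs using buildT.induct with
  | case1 => rw [buildT]; trivial
  | case2 x => rw [buildT]; trivial
  | case3 a b rest ys k ihl ihr =>
    rw [buildT]
    refine ⟨?_, ihl, ihr⟩
    rw [top_eq_maxOf _ ihl, top_eq_maxOf _ ihr]

theorem placeLoop_append (f : Int) (xs ys : List Int) :
    placeLoop f (xs ++ ys) =
      if (placeLoop f xs).1 then ((true : Bool), (placeLoop f xs).2 ++ ys)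
      else ((placeLoop f ys).1, xs ++ (placeLoop f ys).2) := by
  induction xs with
  | nil =>
    simp [placeLoop]
  | cons b bs ih =>
    simp only [placeLoop, List.cons_append, ih]
    by_cases hb : b ≥ f
    · simp [hb]
    · simp only [hb, if_false]
      by_cases hf : (placeLoop f bs).1
      · simp [hf]
      · simp only [Bool.not_eq_true] at hf
        simp [hf]

theorem placeLoop_skip (f : Int) (t : SegTree) (h : t.maxOf < f) :
    placeLoop f t.leaves = (false, t.leaves) := by
  induction t with
  | leaf v =>
    simp only [SegTree.maxOf] at h
    simp [SegTree.leaves, placeLoop, show ¬ v ≥ f by omega]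
  | node m l r ihl ihr =>
    simp only [SegTree.maxOf, max_lt_iff] at h
    simp only [SegTree.leaves]
    rw [placeLoop_append, ihl h.1, ihr h.2]
    simp

theorem placeT_spec (f : Int) (t : SegTree) (h : WF t) :
    (∀ t', placeT f t = some t' →
        placeLoop f t.leaves = (true, t'.leaves) ∧ WF t') ∧
    (placeT f t = none → t.maxOf < f) := by
  induction t with
  | leaf v =>
    constructor
    · intro t' ht
      simp only [placeT] at ht
      split at ht
      · exact absurd ht (by simp)
      · cases ht
        refine ⟨?_, trivial⟩
        rename_i hv
        simp only [SegTree.leaves, placeLoop]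
        simp [show v ≥ f by omega]
    · intro ht
      simp only [placeT] at ht
      split at ht
      · simpa [SegTree.maxOf] using ‹v < f›
      · exact absurd ht (by simp)
  | node m l r ihl ihr =>
    obtain ⟨hm, hwl, hwr⟩ := h
    have ihl := ihl hwl
    have ihr := ihr hwr
    constructor
    · intro t' ht
      simp only [placeT] at ht
      split at ht
      · exact absurd ht (by simp)
      · rename_i hmf
        cases hpl : placeT f l with
        | some l' =>
          rw [hpl] at ht
          cases ht
          obtain ⟨hloop, hwl'⟩ := ihl.1 l' hpl
          refine ⟨?_, ?_, hwl', hwr⟩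
          · simp only [SegTree.leaves]
            rw [placeLoop_append, hloop]
            simp
          · rw [top_eq_maxOf _ hwl', top_eq_maxOf _ hwr]
        | none =>
          rw [hpl] at ht
          have hlmax : l.maxOf < f := ihl.2 hpl
          have hrmax : f ≤ r.maxOf := by
            rcases le_max_iff.mp (show f ≤ max l.maxOf r.maxOf by rw [← hm]; omega) with hc | hc
            · omega
            · exact hc
          cases hpr : placeT f r with
          | none => exact absurd (ihr.2 hpr) (by omega)
          | some r' =>
            simp only [hpr, Option.getD_some] at ht
            cases ht
            obtain ⟨hloopr, hwr'⟩ := ihr.1 r' hpr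
            refine ⟨?_, ?_, hwl, hwr'⟩
            · simp only [SegTree.leaves]
              rw [placeLoop_append, placeLoop_skip f l hlmax]
              simp [hloopr]
            · rw [top_eq_maxOf _ hwl, top_eq_maxOf _ hwr']
    · intro ht
      simp only [placeT] at ht
      split at ht
      · rename_i hmf
        simp only [SegTree.maxOf]
        rw [← hm]; exact hmf
      · cases hpl : placeT f l <;> simp [hpl] at ht

theorem fold_empty (fruits : List Int) (out : Int) :
    (fruits.foldl (fun st fruit =>
      let r := placeLoop fruit st.2
      (if r.1 then st.1 else st.1 + 1, r.2)) (out, ([] : List Int))).1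
      = out + fruits.length := by
  induction fruits generalizing out with
  | nil => simp
  | cons f fs ih => simp [placeLoop, ih]; omega

theorem fold_agree (fruits : List Int) (out : Int) (t : SegTree) (hw : WF t) :
    (fruits.foldl (fun st fruit =>
      let r := placeLoop fruit st.2
      (if r.1 then st.1 else st.1 + 1, r.2)) (out, t.leaves)).1
    = (fruits.foldl (fun st f =>
        match placeT f st.2 with
        | some t' => (st.1, t')
        | none => (st.1 + 1, st.2)) (out, t)).1 := by
  induction fruits generalizing out t with
  | nil => rfl
  | cons f fs ih =>
    simp only [List.foldl_cons]
    cases hp : placeT f t with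
    | some t' =>
      obtain ⟨hloop, hwt'⟩ := (placeT_spec f t hw).1 t' hp
      simp only [hloop]
      simpa using ih out t' hwt'
    | none =>
      have hmax := (placeT_spec f t hw).2 hp
      have hloop := placeLoop_skip f t hmax
      simp only [hloop]
      simpa using ih (out + 1) t hw

-- ===== VERDICT (by name: the statement is the Claim_ definition above) =====
theorem numOfUnplacedFruits_spec : Claim_equal_numOfUnplacedFruits := by
  intro fruits baskets _
  unfold Spec_numOfUnplacedFruits numOfUnplacedFruits numOfUnplacedFruits_alt
  cases baskets with
  | nil => simpa using fold_empty fruits 0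
  | cons b bs =>
    have hne : (b :: bs) ≠ [] := by simp
    have := fold_agree fruits 0 (buildT (b :: bs)) (wf_buildT _)
    rw [leaves_buildT _ hne] at this
    exact this
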